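-- pv_equiv track=rewrite | github.com/EntropyEndeavor/Project-Euler-Utility-Library | project_euler.py | xor_mul
-- ===== SOURCE A (Python) =====
-- def xor_mul(a: int, b: int) -> int:
--     """Perform binary long multiplication with bitwise XOR instead of addition.
--
--     The XOR multiplication was definied in Problem 810
--     and has been used in a number of problems since.
--     This function will not work correctly in SageMath due to
--     the bitwise XOR operator being treated as exponentiation.
--     """
--     ans = 0
--     while a != 0:
--         if a & 1:
--             ans ^= b
--         a >>= 1
--         b <<= 1
--
--     return ans
-- ===== SOURCE B (Python) =====
-- def xor_mul(a: int, b: int) -> int: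
--     """Carryless (GF(2)) product computed as an output-bit convolution:
--     bit k of the result is the parity of a_i & b_j over all i + j = k."""
--     n = a.bit_length() + b.bit_length()
--     ans = 0
--     for k in range(n):
--         p = 0
--         for i in range(k + 1):
--             p ^= ((a >> i) & 1) & ((b >> (k - i)) & 1)
--         ans |= p << k
--     return ans
-- ===== Notes on version B (the rewrite author's own statement) =====
-- stated objective: alternative
-- what changed: B computes each output bit as a GF(2) convolution (bit k of the answer is the XOR over i of a_i AND b_{k-i}, OR-ed into place), instead of A's shift-and-accumulate loop that XORs shifted copies of b for every set bit of a.
-- outside the precondition, e.g. on xor_mul(7, -5): A returns -31, B returns 33; on xor_mul(-1, 1): A does not finish within the time limit, B returns 3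
import Mathlib
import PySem

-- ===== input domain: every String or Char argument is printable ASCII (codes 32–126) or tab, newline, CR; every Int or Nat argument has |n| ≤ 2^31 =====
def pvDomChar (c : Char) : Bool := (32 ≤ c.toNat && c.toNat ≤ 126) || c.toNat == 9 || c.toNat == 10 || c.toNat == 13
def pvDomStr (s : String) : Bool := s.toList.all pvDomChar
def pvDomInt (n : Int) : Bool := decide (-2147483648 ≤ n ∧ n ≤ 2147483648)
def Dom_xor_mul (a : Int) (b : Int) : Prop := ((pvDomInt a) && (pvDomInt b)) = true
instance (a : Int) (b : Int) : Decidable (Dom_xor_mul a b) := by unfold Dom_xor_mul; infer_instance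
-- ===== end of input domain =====

-- B replaces A's shift-and-accumulate loop by an output-bit GF(2) convolution
-- (bit k of the result = XOR over i of a_i AND b_{k-i}); alternative algorithm, not faster.

-- ===== PORT A =====
-- the while loop, one constructor per iteration; the fuel (= a.bit_length()) is exactly the
-- number of iterations Python performs when a ≥ 0 (for a < 0 Python never terminates)
def xorMulGo : Nat → Int → Int → Int → Int
  | 0, _, _, ans => ans
  | fuel+1, a, b, ans =>
    if a = 0 then ans
    else xorMulGo fuel (a >>> 1) (b <<< 1)
      (if PySem.Int.band a 1 ≠ 0 then PySem.Int.bxor ans b else ans)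

def xor_mul (a : Int) (b : Int) : Int := xorMulGo (PySem.Int.bitLength a) a b 0

-- ===== PORT B =====
def xor_mul_alt (a : Int) (b : Int) : Int :=
  let n := PySem.Int.bitLength a + PySem.Int.bitLength b
  (List.range n).foldl (fun (ans : Int) (k : Nat) =>
    PySem.Int.bor ans
      (((List.range (k+1)).foldl (fun (p : Int) (i : Nat) =>
          PySem.Int.bxor p
            (PySem.Int.band (PySem.Int.band (a >>> i) 1)
                            (PySem.Int.band (b >>> (k - i)) 1))) 0) <<< k)) 0

-- ===== PRECONDITION & SPEC =====
-- Pre_ excludes a < 0, on which A's while loop never terminates (a >> 1 stalls at -1), and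
-- b < 0, on which A's return value is an artefact of Python's infinite two's-complement
-- encoding — the GF(2)-polynomial reading of the ints that defines this product (PE problem
-- 810) only exists for non-negative operands, and B computes that convolution.
def Pre_xor_mul (a : Int) (b : Int) : Prop := 0 ≤ a ∧ 0 ≤ b
instance (a : Int) (b : Int) : Decidable (Pre_xor_mul a b) := by unfold Pre_xor_mul; infer_instance
def pvWitness_xor_mul : Int × Int := (6, 5)

def Spec_xor_mul (a : Int) (b : Int) (out : Int) : Prop := out = xor_mul_alt a b
instance (a : Int) (b : Int) (out : Int) : Decidable (Spec_xor_mul a b out) := by unfold Spec_xor_mul; infer_instance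

-- ===== CLAIM (what is proved, stated in full; the proofs are below) =====
def Claim_equal_xor_mul : Prop := ∀ (a : Int) (b : Int), Dom_xor_mul a b → Pre_xor_mul a b → Spec_xor_mul a b (xor_mul a b)

-- ===== LEMMAS AND PROOFS =====

-- A's loop, accumulator dropped, on Nat (recursion on m, halving)
def gN (m n : Nat) : Nat :=
  if h : m = 0 then 0
  else (if m &&& 1 = 1 then n else 0) ^^^ gN (m / 2) (2 * n)
termination_by m
decreasing_by exact Nat.div_lt_self (Nat.pos_of_ne_zero h) one_lt_two

-- B's inner parity, on Bool
def pbN (m n : Nat) (j : Nat) : Bool :=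
  (List.range (j+1)).foldl (fun p i => p ^^ (m.testBit i && n.testBit (j - i))) false

-- B's outer accumulator, on Nat
def convN (m n : Nat) (N : Nat) : Nat :=
  (List.range N).foldl (fun ans k => ans ||| ((if pbN m n k then 1 else 0) <<< k)) 0

-- an xor-fold over an everywhere-false bit function keeps its accumulator
lemma foldXor_false {a : Type} (t : a → Bool) (l : List a) (s : Bool)
    (h : ∀ i, i ∈ l → t i = false) : l.foldl (fun p i => p ^^ t i) s = s := by
  induction l generalizing s with
  | nil => rfl
  | cons x l ih =>
    simp only [List.foldl_cons, h x (List.mem_cons_self), Bool.xor_false]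
    exact ih s (fun i hi => h i (List.mem_cons_of_mem _ hi))

-- peel the i = 0 term off an xor-fold over range (j+1)
lemma foldXor_range_succ (t : Nat → Bool) (j : Nat) :
    (List.range (j+1)).foldl (fun p i => p ^^ t i) false
      = (t 0 ^^ (List.range j).foldl (fun p i => p ^^ t (i+1)) false) := by
  induction j with
  | zero => simp
  | succ j ih =>
    rw [List.range_succ, List.foldl_append, ih, List.range_succ, List.foldl_append]
    simp only [List.foldl_cons, List.foldl_nil]
    rw [Bool.xor_assoc]

lemma gN_zero (n : Nat) : gN 0 n = 0 := by
  rw [gN]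
  norm_num

-- bit-extraction helpers
lemma and_one_eq_ite (m : Nat) (i : Nat) :
    (m >>> i) &&& 1 = if m.testBit i then 1 else 0 := by
  rcases h : m.testBit i <;> simp [Nat.testBit, Nat.and_one_is_mod] at h ⊢ <;> omega

lemma testBit_two_mul' (q n : Nat) :
    (2*n).testBit q = (decide (q ≥ 1) && n.testBit (q-1)) := by
  have h : 2*n = n <<< 1 := by rw [Nat.shiftLeft_eq]; ring
  rw [h, Nat.testBit_shiftLeft]

lemma testBit_ite_one (b : Bool) (j N : Nat) (h : N ≤ j) :
    Nat.testBit (if b then 1 else 0) (j - N) = (decide (j = N) && b) := by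
  rcases Nat.lt_or_ge N j with h'|h'
  · obtain ⟨k, hk⟩ := Nat.exists_eq_succ_of_ne_zero (show j - N ≠ 0 by omega)
    have hne : (decide (j = N)) = false := by simp; omega
    rw [hk, hne, Bool.false_and]
    split
    · rw [Nat.testBit_succ]; norm_num
    · exact Nat.zero_testBit _
  · have hj : j = N := le_antisymm h' h
    simp [hj]; cases b <;> simp

-- bit j of A's result is B's parity pbN
lemma gN_testBit (m : Nat) : ∀ (n j : Nat), (gN m n).testBit j = pbN m n j := by
  induction m using Nat.strong_induction_on with
  | _ m ih =>
  intro n j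
  by_cases h0 : m = 0
  · subst h0
    rw [gN_zero, Nat.zero_testBit]
    exact (foldXor_false _ _ _ (by intro i _; simp [Nat.zero_testBit])).symm
  · have hlt : m / 2 < m := Nat.div_lt_self (Nat.pos_of_ne_zero h0) one_lt_two
    have hg : gN m n = (if m &&& 1 = 1 then n else 0) ^^^ gN (m / 2) (2 * n) := by
      conv_lhs => rw [gN]
      rw [dif_neg h0]
    have hsel : (if m &&& 1 = 1 then n else 0).testBit j = (m.testBit 0 && n.testBit j) := by
      rcases Nat.mod_two_eq_zero_or_one m with h2|h2 <;>
        simp [Nat.and_one_is_mod, h2, Nat.testBit_zero, Nat.zero_testBit]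
    have hL : pbN (m/2) (2*n) j
        = (List.range j).foldl (fun p i => p ^^ (m.testBit (i+1) && n.testBit (j-i-1))) false := by
      unfold pbN
      rw [PySem.List.foldl_congr_mem (List.range (j+1)) _
          (fun p i => p ^^ (m.testBit (i+1) && (decide (j-i ≥ 1) && n.testBit (j-i-1)))) false
          (by intro acc i _; rw [Nat.testBit_div_two, testBit_two_mul'])]
      rw [List.range_succ, List.foldl_append]
      simp only [List.foldl_cons, List.foldl_nil]
      have hdz : decide (j - j ≥ 1) = false := by simp
      rw [hdz, Bool.false_and, Bool.and_false, Bool.xor_false]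
      apply PySem.List.foldl_congr_mem
      intro acc i hi
      have hij : i < j := List.mem_range.mp hi
      simp [show 1 ≤ j - i by omega]
    have hR : pbN m n j
        = ((m.testBit 0 && n.testBit j)
            ^^ (List.range j).foldl (fun p i => p ^^ (m.testBit (i+1) && n.testBit (j-i-1))) false) := by
      unfold pbN
      rw [foldXor_range_succ (fun i => m.testBit i && n.testBit (j-i)) j]
      simp only [Nat.sub_zero]
      congr 1
    rw [hg, Nat.testBit_xor, ih (m/2) hlt (2*n) j, hsel, hL, hR]

-- bit j of B's accumulator
lemma convN_testBit (m n : Nat) (N : Nat) (j : Nat) :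
    (convN m n N).testBit j = (decide (j < N) && pbN m n j) := by
  unfold convN
  induction N with
  | zero => simp
  | succ N ih =>
    rw [List.range_succ, List.foldl_append]
    simp only [List.foldl_cons, List.foldl_nil]
    rw [Nat.testBit_or, ih, Nat.testBit_shiftLeft]
    rcases Nat.lt_trichotomy j N with h|h|h
    · simp [h, Nat.lt_succ_of_lt h, show ¬(j ≥ N) by omega]
    · subst h
      rw [testBit_ite_one _ _ _ le_rfl]
      simp
    · rw [testBit_ite_one _ _ _ (le_of_lt h)]
      simp [show ¬(j < N) by omega, show ¬(j < N+1) by omega, show j ≠ N by omega,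
            show j ≥ N by omega]

-- out-of-range output bits of the convolution are 0
lemma pbN_high (m n p q : Nat) (hm : m < 2^p) (hn : n < 2^q) (j : Nat) (hj : p + q ≤ j) :
    pbN m n j = false := by
  unfold pbN
  apply foldXor_false
  intro i _
  by_cases hip : i < p
  · have h : n.testBit (j - i) = false :=
      Nat.testBit_lt_two_pow (lt_of_lt_of_le hn (Nat.pow_le_pow_right (by norm_num) (by omega)))
    simp [h]
  · have h : m.testBit i = false :=
      Nat.testBit_lt_two_pow (lt_of_lt_of_le hm (Nat.pow_le_pow_right (by norm_num) (by omega)))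
    simp [h]

-- the two Nat-level algorithms agree
lemma gN_eq_convN (m n p q N : Nat) (hm : m < 2^p) (hn : n < 2^q) (hN : p + q ≤ N) :
    gN m n = convN m n N := by
  apply Nat.eq_of_testBit_eq
  intro j
  rw [gN_testBit, convN_testBit]
  by_cases hj : j < N
  · simp [hj]
  · simp [hj, pbN_high m n p q hm hn j (by omega)]

-- A's port on casts computes gN
lemma xorMulGo_cast (fuel : Nat) : ∀ (m n c : Nat), m < 2 ^ fuel → 
    xorMulGo fuel (m : Int) (n : Int) (c : Int) = ((c ^^^ gN m n : Nat) : Int) := by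
  induction fuel with
  | zero =>
    intro m n c h
    have hm0 : m = 0 := by simpa using h
    subst hm0
    simp [xorMulGo, gN_zero]
  | succ fuel ih =>
    intro m n c h
    by_cases h0 : m = 0
    · subst h0
      simp [xorMulGo, gN_zero]
    · have hne : ((m:Int)) ≠ 0 := by exact_mod_cast h0
      simp only [xorMulGo, if_neg hne]
      have hsr : ((m:Int) >>> (1:Int)) = ((m/2 : Nat) : Int) := by
        rw [←Nat.shiftRight_one m]
        exact_mod_cast Int.shiftRight_natCast m 1
      have hsl : ((n:Int) <<< (1:Int)) = ((2*n : Nat) : Int) := by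
        rw [show (2*n) = n <<< 1 by rw [Nat.shiftLeft_eq]; ring]
        exact_mod_cast Int.shiftLeft_natCast n 1
      have hbr : (if PySem.Int.band (m:Int) 1 ≠ 0 then PySem.Int.bxor (c:Int) (n:Int) else ((c:Nat):Int))
          = ((c ^^^ (if m &&& 1 = 1 then n else 0) : Nat) : Int) := by
        have hb1 : PySem.Int.band (m:Int) 1 = ((m &&& 1 : Nat) : Int) := by
          exact_mod_cast PySem.Int.band_natCast m 1
        rw [hb1]
        rcases Nat.mod_two_eq_zero_or_one m with h2|h2
        · have ha : m &&& 1 = 0 := by rw [Nat.and_one_is_mod, h2]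
          simp [ha]
        · have ha : m &&& 1 = 1 := by rw [Nat.and_one_is_mod, h2]
          have hx : PySem.Int.bxor (c:Int) (n:Int) = ((c ^^^ n : Nat) : Int) :=
            PySem.Int.bxor_natCast c n
          simp [ha, hx]
      rw [hbr, hsr, hsl, ih (m/2) (2*n) _ (by
        have h2 : (2:Nat)^(fuel+1) = 2^fuel*2 := by rw [pow_succ]
        omega)]
      have hg : gN m n = (if m &&& 1 = 1 then n else 0) ^^^ gN (m / 2) (2 * n) := by
        conv_lhs => rw [gN]
        rw [dif_neg h0]
      rw [hg, Nat.xor_assoc]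

-- B's inner term on casts
lemma term_cast (m n k i : Nat) :
    PySem.Int.band (PySem.Int.band ((m:Int) >>> i) 1) (PySem.Int.band ((n:Int) >>> (k-i)) 1)
      = ((if m.testBit i && n.testBit (k-i) then 1 else 0 : Nat) : Int) := by
  have h1 : ((m:Int) >>> i) = ((m >>> i : Nat) : Int) := by
    rw [←Int.shiftRight_natCast_right, Int.shiftRight_natCast]
  have h2 : ((n:Int) >>> (k-i)) = ((n >>> (k-i) : Nat) : Int) := by
    rw [←Int.shiftRight_natCast_right, Int.shiftRight_natCast]
  have b1 : PySem.Int.band ((m >>> i : Nat) : Int) 1 = (((m >>> i) &&& 1 : Nat) : Int) := by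
    exact_mod_cast PySem.Int.band_natCast (m >>> i) 1
  have b2 : PySem.Int.band ((n >>> (k-i) : Nat) : Int) 1 = (((n >>> (k-i)) &&& 1 : Nat) : Int) := by
    exact_mod_cast PySem.Int.band_natCast (n >>> (k-i)) 1
  rw [h1, h2, b1, b2, PySem.Int.band_natCast, and_one_eq_ite, and_one_eq_ite]
  cases m.testBit i <;> cases n.testBit (k-i) <;> norm_num

-- B's inner fold on casts
lemma inner_cast (m n k : Nat) (l : List Nat) : ∀ (s : Bool),
    l.foldl (fun (p : Int) (i : Nat) => PySem.Int.bxor p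
        (PySem.Int.band (PySem.Int.band ((m:Int) >>> i) 1) (PySem.Int.band ((n:Int) >>> (k - i)) 1)))
      ((if s then 1 else 0 : Nat) : Int)
    = ((if l.foldl (fun p i => p ^^ (m.testBit i && n.testBit (k - i))) s then 1 else 0 : Nat) : Int) := by
  induction l with
  | nil => intro s; rfl
  | cons x l ih =>
    intro s
    simp only [List.foldl_cons]
    rw [term_cast]
    have hx : PySem.Int.bxor ((if s then 1 else 0 : Nat) : Int)
        ((if m.testBit x && n.testBit (k-x) then 1 else 0 : Nat) : Int)
        = ((if s ^^ (m.testBit x && n.testBit (k-x)) then 1 else 0 : Nat) : Int) := by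
      cases s <;> cases hb : (m.testBit x && n.testBit (k-x)) <;> decide
    rw [hx]
    exact ih _

-- B's outer fold on casts
lemma outer_cast (m n : Nat) (l : List Nat) : ∀ (c : Nat),
    l.foldl (fun (ans : Int) (k : Nat) => PySem.Int.bor ans
        (((List.range (k+1)).foldl (fun (p : Int) (i : Nat) => PySem.Int.bxor p
            (PySem.Int.band (PySem.Int.band ((m:Int) >>> i) 1)
                            (PySem.Int.band ((n:Int) >>> (k - i)) 1))) 0) <<< k))
      ((c : Nat) : Int)
    = ((l.foldl (fun ans k => ans ||| ((if pbN m n k then 1 else 0) <<< k)) c : Nat) : Int) := by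
  induction l with
  | nil => intro c; rfl
  | cons x l ih =>
    intro c
    simp only [List.foldl_cons]
    have h0 : (0 : Int) = ((if false then 1 else 0 : Nat) : Int) := by norm_num
    rw [h0, inner_cast]
    have hpb : (List.range (x+1)).foldl (fun p i => p ^^ (m.testBit i && n.testBit (x - i))) false
        = pbN m n x := rfl
    rw [hpb]
    have hsl : (((if pbN m n x then 1 else 0 : Nat) : Int)) <<< x
        = (((if pbN m n x then 1 else 0) <<< x : Nat) : Int) := by
      rw [←Int.shiftLeft_natCast_right, Int.shiftLeft_natCast]
    rw [hsl, PySem.Int.bor_natCast]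
    exact ih _

-- B's port on casts computes convN
lemma xor_mul_alt_cast (m n : Nat) :
    xor_mul_alt (m : Int) (n : Int) =
      ((convN m n (PySem.Int.bitLength (m : Int) + PySem.Int.bitLength (n : Int)) : Nat) : Int) := by
  have h := outer_cast m n (List.range (PySem.Int.bitLength (m:Int) + PySem.Int.bitLength (n:Int))) 0
  simp only [Nat.cast_zero] at h
  show (List.range (PySem.Int.bitLength (m:Int) + PySem.Int.bitLength (n:Int))).foldl _ 0 = _
  rw [h]
  rfl

-- ===== VERDICT (by name: the statement is the Claim_ definition above) =====
theorem xor_mul_spec : Claim_equal_xor_mul := by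
  intro a b _ hpre
  obtain ⟨ha, hb⟩ := hpre
  obtain ⟨m, rfl⟩ : ∃ m : Nat, a = (m : Int) := ⟨a.toNat, (Int.toNat_of_nonneg ha).symm⟩
  obtain ⟨n, rfl⟩ : ∃ n : Nat, b = (n : Int) := ⟨b.toNat, (Int.toNat_of_nonneg hb).symm⟩
  show xor_mul _ _ = xor_mul_alt _ _
  have hm : m < 2 ^ PySem.Int.bitLength (m : Int) := by
    have := PySem.Int.lt_two_pow_bitLength (m : Int)
    simpa using this
  have hn : n < 2 ^ PySem.Int.bitLength (n : Int) := by
    have := PySem.Int.lt_two_pow_bitLength (n : Int)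
    simpa using this
  rw [xor_mul_alt_cast]
  show xorMulGo (PySem.Int.bitLength (m : Int)) (m : Int) (n : Int) ((0 : Nat) : Int) = _
  rw [xorMulGo_cast _ m n 0 hm, Nat.zero_xor,
      gN_eq_convN m n _ _ _ hm hn le_rfl]
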